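-- pv_equiv track=rewrite | github.com/Joshwa034/Python- | keyboardDrives.py | getMoneySpent
-- ===== SOURCE A (Python) =====
-- def getMoneySpent(keyboards, drives, b):
--
--     a = keyboards
--     d = drives
--
--     ls = []
--     res = 0
--     for i in range(len(a)):
--         for j in range(len(d)):
--             res = a[i]+d[j]
--             if res<=b:
--                 ls.append(res)
--                 res = 0
--     if len(ls)==0:
--         return -1
--     else:
--
--         sol = max(ls)
--         return sol
-- ===== SOURCE B (Python) =====
-- def getMoneySpent(keyboards, drives, b):
--     # sort drives once; for each keyboard, binary-search the priciest affordable drive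
--     ds = sorted(drives)
--     best = None
--     for k in keyboards:
--         lo, hi = 0, len(ds)
--         while lo < hi:
--             mid = (lo + hi) // 2
--             if ds[mid] <= b - k:
--                 lo = mid + 1
--             else:
--                 hi = mid
--         if lo > 0:
--             s = k + ds[lo - 1]
--             if best is None or s > best:
--                 best = s
--     return -1 if best is None else best
-- ===== Notes on version B (the rewrite author's own statement) =====
-- stated objective: faster
-- what changed: A scans every keyboard/drive pair collecting all affordable sums and then takes max; B sorts the drives once and, for each keyboard, binary-searches the priciest drive still within budget, keeping a running best.
import Mathlib
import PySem

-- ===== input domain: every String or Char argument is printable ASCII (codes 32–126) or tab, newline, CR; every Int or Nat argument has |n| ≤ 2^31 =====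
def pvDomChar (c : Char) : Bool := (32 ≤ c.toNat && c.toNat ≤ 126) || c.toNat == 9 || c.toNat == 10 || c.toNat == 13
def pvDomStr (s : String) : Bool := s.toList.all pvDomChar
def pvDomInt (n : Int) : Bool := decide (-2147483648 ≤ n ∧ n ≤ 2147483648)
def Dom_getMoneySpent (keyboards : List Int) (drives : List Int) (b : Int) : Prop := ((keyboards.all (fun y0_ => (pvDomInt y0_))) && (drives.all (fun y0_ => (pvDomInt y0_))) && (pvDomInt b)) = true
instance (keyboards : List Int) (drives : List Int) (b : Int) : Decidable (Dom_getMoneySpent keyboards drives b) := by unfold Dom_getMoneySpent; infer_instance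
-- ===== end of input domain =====

-- B replaces A's scan over all keyboard/drive pairs by sorting the drives once and
-- binary-searching the priciest affordable drive per keyboard (objective: faster).

-- ===== PORT A =====
-- literal transliteration of A; range(len(..)) indices are always in range, so the pyGetD default 0 is never used
def getMoneySpent (keyboards : List Int) (drives : List Int) (b : Int) : Int :=
  let a := keyboards
  let d := drives
  let st : List Int × Int :=
    (PySem.List.pyRange 0 (a.length : Int) 1).foldl (fun st i =>
      (PySem.List.pyRange 0 (d.length : Int) 1).foldl (fun st j =>
        if PySem.List.pyGetD a i 0 + PySem.List.pyGetD d j 0 ≤ b then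
          (st.1 ++ [PySem.List.pyGetD a i 0 + PySem.List.pyGetD d j 0], 0)
        else (st.1, PySem.List.pyGetD a i 0 + PySem.List.pyGetD d j 0)) st) ([], 0)
  let ls := st.1
  if ls.length == 0 then -1
  else (PySem.List.max? ls (fun x => x)).getD 0  -- max(ls); ls is nonempty here, so the default 0 is never used

-- ===== PORT B =====
-- the while-loop of Source B: lo, hi are nonnegative Python ints, (lo+hi)//2 is Nat division here;
-- ds[mid] with mid < hi ≤ len(ds) is always in range, so the pyGetD default 0 is never used
def pvBSearch (ds : List Int) (x : Int) (lo hi : Nat) : Nat :=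
  if lo < hi then
    let mid := (lo + hi) / 2
    if PySem.List.pyGetD ds (mid : Int) 0 ≤ x then pvBSearch ds x (mid + 1) hi
    else pvBSearch ds x lo mid
  else lo
termination_by hi - lo
decreasing_by all_goals omega

def getMoneySpent_alt (keyboards : List Int) (drives : List Int) (b : Int) : Int :=
  let ds := PySem.List.sorted drives (fun x => x) false
  let best := keyboards.foldl (fun (best : Option Int) k =>
    let lo := pvBSearch ds (b - k) 0 ds.length
    if 0 < lo then
      let s := k + PySem.List.pyGetD ds ((lo - 1 : Nat) : Int) 0
      match best with
      | none => some s
      | some v => if s > v then some s else some v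
    else best) none
  match best with
  | none => -1
  | some v => v

-- ===== PRECONDITION & SPEC =====
def Spec_getMoneySpent (keyboards : List Int) (drives : List Int) (b : Int) (out : Int) : Prop := out = getMoneySpent_alt keyboards drives b
instance (keyboards : List Int) (drives : List Int) (b : Int) (out : Int) : Decidable (Spec_getMoneySpent keyboards drives b out) := by unfold Spec_getMoneySpent; infer_instance

-- ===== CLAIM (what is proved, stated in full; the proofs are below) =====
def Claim_equal_getMoneySpent : Prop := ∀ (keyboards : List Int) (drives : List Int) (b : Int), Dom_getMoneySpent keyboards drives b → Spec_getMoneySpent keyboards drives b (getMoneySpent keyboards drives b)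

-- ===== LEMMAS AND PROOFS =====

/-- the affordable sums contributed by one keyboard `k` -/
def pvSums (drives : List Int) (b k : Int) : List Int :=
  (drives.filter (fun d => decide (k + d ≤ b))).map (fun d => k + d)

/-- running optional maximum (B's `best` update is exactly this) -/
def pvOmax : Option Int → Int → Option Int
  | none, s => some s
  | some v, s => some (max v s)

-- ---- A-side: the nested loop collects exactly all affordable sums ----

lemma pvInner_fst (drives : List Int) (b k : Int) (st : List Int × Int) :
    (drives.foldl (fun st d =>
      if k + d ≤ b then (st.1 ++ [k + d], 0) else (st.1, k + d)) st).1
    = st.1 ++ pvSums drives b k := by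
  induction drives generalizing st with
  | nil => simp [pvSums]
  | cons d t ih =>
    simp only [List.foldl_cons]
    by_cases h : k + d ≤ b
    · simp [h, ih, pvSums, List.append_assoc]
    · simp [h, ih, pvSums]

lemma pvOuter_fst (keyboards drives : List Int) (b : Int) (st : List Int × Int) :
    (keyboards.foldl (fun st k =>
      drives.foldl (fun st d =>
        if k + d ≤ b then (st.1 ++ [k + d], 0) else (st.1, k + d)) st) st).1
      = st.1 ++ keyboards.flatMap (fun k => pvSums drives b k) := by
  induction keyboards generalizing st with
  | nil => simp
  | cons k t ih =>
    simp only [List.foldl_cons, List.flatMap_cons]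
    rw [ih, pvInner_fst, List.append_assoc]

/-- A's nested index loop, stated on the pyRange/pyGetD form of the port -/
lemma pvA_ls (keyboards drives : List Int) (b : Int) :
    (List.foldl (fun (st : List Int × Int) i =>
        List.foldl (fun (st : List Int × Int) j =>
            if PySem.List.pyGetD keyboards i 0 + PySem.List.pyGetD drives j 0 ≤ b then
              (st.1 ++ [PySem.List.pyGetD keyboards i 0 + PySem.List.pyGetD drives j 0], 0)
            else (st.1, PySem.List.pyGetD keyboards i 0 + PySem.List.pyGetD drives j 0))
          st (PySem.List.pyRange 0 (drives.length : Int) 1))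
      ([], 0) (PySem.List.pyRange 0 (keyboards.length : Int) 1)).1
    = keyboards.flatMap (fun k => pvSums drives b k) := by
  have hinner : ∀ (k : Int) (st : List Int × Int),
      List.foldl (fun (st : List Int × Int) j =>
          if k + PySem.List.pyGetD drives j 0 ≤ b then (st.1 ++ [k + PySem.List.pyGetD drives j 0], 0)
          else (st.1, k + PySem.List.pyGetD drives j 0))
        st (PySem.List.pyRange 0 (drives.length : Int) 1)
      = List.foldl (fun (st : List Int × Int) d =>
          if k + d ≤ b then (st.1 ++ [k + d], 0) else (st.1, k + d)) st drives := by
    intro k st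
    exact PySem.List.foldl_pyRange_zero_pyGetD' drives 0
      (fun (st : List Int × Int) d => if k + d ≤ b then (st.1 ++ [k + d], 0) else (st.1, k + d)) st
  have hout := PySem.List.foldl_pyRange_zero_pyGetD' keyboards 0
    (fun (st : List Int × Int) k =>
      List.foldl (fun (st : List Int × Int) j =>
          if k + PySem.List.pyGetD drives j 0 ≤ b then (st.1 ++ [k + PySem.List.pyGetD drives j 0], 0)
          else (st.1, k + PySem.List.pyGetD drives j 0))
        st (PySem.List.pyRange 0 (drives.length : Int) 1)) ([], 0)
  refine Eq.trans (congrArg Prod.fst hout) ?_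
  simp only [hinner]
  rw [pvOuter_fst]
  simp

-- ---- max bookkeeping ----

lemma pvOmax_some_foldl (l : List Int) (v : Int) :
    l.foldl pvOmax (some v) = some (l.foldl max v) := by
  induction l generalizing v with
  | nil => rfl
  | cons h t ih => simp [pvOmax, ih]

lemma pvFoldl_max_eq (l : List Int) (v m : Int) (hm : m ∈ l) (hb : ∀ y ∈ l, y ≤ m) :
    l.foldl max v = max v m := by
  have h1 := PySem.List.le_foldl_max l v
  have h2 := PySem.List.foldl_max_mem l v
  apply le_antisymm
  · rcases h2 with h | h
    · simp [h]
    · exact le_trans (hb _ h) (le_max_right _ _)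
  · exact max_le h1.1 (h1.2 m hm)

lemma pvOmax_foldl_eq (l : List Int) (acc : Option Int) (m : Int)
    (hm : m ∈ l) (hb : ∀ y ∈ l, y ≤ m) :
    l.foldl pvOmax acc = pvOmax acc m := by
  cases acc with
  | some v =>
    rw [pvOmax_some_foldl, pvFoldl_max_eq l v m hm hb]; rfl
  | none =>
    cases l with
    | nil => cases hm
    | cons h t =>
      simp only [List.foldl_cons, pvOmax, pvOmax_some_foldl]
      have : t.foldl max h = m := by
        have h1 := PySem.List.le_foldl_max t h
        have h2 := PySem.List.foldl_max_mem t h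
        apply le_antisymm
        · rcases h2 with h' | h'
          · rw [h']; exact hb _ (List.mem_cons_self)
          · exact hb _ (List.mem_cons_of_mem _ h')
        · rcases List.mem_cons.mp hm with rfl | h'
          · exact h1.1
          · exact h1.2 _ h'
      rw [this]

-- ---- sorted-list counting and the binary search ----

lemma pvSorted_count_iff (ds : List Int) (x : Int) (hs : ds.Pairwise (· ≤ ·)) :
    ∀ i (h : i < ds.length), (ds[i] ≤ x ↔ i < ds.countP (fun d => decide (d ≤ x))) := by
  induction ds with
  | nil => intro i h; simp at h
  | cons a t ih =>
    rw [List.pairwise_cons] at hs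
    intro i h
    by_cases ha : a ≤ x
    · have hc : (a :: t).countP (fun d => decide (d ≤ x)) = t.countP (fun d => decide (d ≤ x)) + 1 := by
        simp [ha]
      cases i with
      | zero => simp only [List.getElem_cons_zero, hc]; omega
      | succ n =>
        have hn : n < t.length := by simpa using h
        have hiff := ih hs.2 n hn
        simp only [List.getElem_cons_succ, hc]
        omega
    · have hall : ∀ y ∈ (a :: t), ¬ y ≤ x := by
        intro y hy
        rcases List.mem_cons.mp hy with rfl | hy'
        · exact ha
        · intro hyx; exact ha (le_trans (hs.1 y hy') hyx)
      have hc : (a :: t).countP (fun d => decide (d ≤ x)) = 0 := by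
        rw [List.countP_eq_zero]
        intro y hy; simpa using hall y hy
      rw [hc]
      constructor
      · intro hle; exact absurd hle (hall _ (List.getElem_mem h))
      · omega

lemma pvBSearch_eq (ds : List Int) (x : Int) (c : Nat) (_hcl : c ≤ ds.length)
    (hiff : ∀ i (h : i < ds.length), (ds[i] ≤ x ↔ i < c)) :
    ∀ lo hi, lo ≤ c → c ≤ hi → hi ≤ ds.length → pvBSearch ds x lo hi = c := by
  intro lo hi
  induction hn : hi - lo using Nat.strong_induction_on generalizing lo hi with
  | _ n ih =>
    intro hlo hhi hlen
    rw [pvBSearch]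
    by_cases h : lo < hi
    · simp only [h, if_true]
      have hmlo : lo ≤ (lo + hi) / 2 := by omega
      have hmhi : (lo + hi) / 2 < hi := by omega
      have hmlen : (lo + hi) / 2 < ds.length := by omega
      rw [PySem.List.pyGetD_natCast]
      rw [List.getD_eq_getElem ds 0 hmlen]
      by_cases hm : ds[(lo + hi) / 2] ≤ x
      · have hlt : (lo + hi) / 2 < c := (hiff _ hmlen).mp hm
        simp only [hm, if_true]
        exact ih (hi - ((lo + hi) / 2 + 1)) (by omega) _ _ rfl (by omega) hhi hlen
      · have hge : c ≤ (lo + hi) / 2 := by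
          by_contra hcon
          exact hm ((hiff _ hmlen).mpr (by omega))
        simp only [hm, if_false]
        exact ih ((lo + hi) / 2 - lo) (by omega) _ _ rfl hlo hge (by omega)
    · simp only [h, if_false]
      omega

-- ---- B's per-keyboard step folds the affordable sums of that keyboard ----

lemma pvStep_eq (drives : List Int) (b k : Int) (acc : Option Int) :
    (let ds := PySem.List.sorted drives (fun x => x) false
     let lo := pvBSearch ds (b - k) 0 ds.length
     if 0 < lo then
       let s := k + PySem.List.pyGetD ds ((lo - 1 : Nat) : Int) 0
       match acc with
       | none => some s
       | some v => if s > v then some s else some v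
     else acc) = (pvSums drives b k).foldl pvOmax acc := by
  have hperm : (PySem.List.sorted drives (fun x => x) false).Perm drives :=
    PySem.List.sorted_perm drives (fun x => x) false
  set ds := PySem.List.sorted drives (fun x => x) false with hds
  set c : Nat := ds.countP (fun d => decide (d ≤ b - k)) with hcdef
  have hcl : c ≤ ds.length := List.countP_le_length
  have hpair : ds.Pairwise (· ≤ ·) := PySem.List.sorted_pairwise drives (fun x => x)
  have hiff := pvSorted_count_iff ds (b - k) hpair
  have hbs : pvBSearch ds (b - k) 0 ds.length = c :=
    pvBSearch_eq ds (b - k) c hcl (by intro i h; rw [hiff i h, ← hcdef]) 0 ds.length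
      (Nat.zero_le c) hcl le_rfl
  have hsums : pvSums drives b k = (drives.filter (fun d => decide (d ≤ b - k))).map (fun d => k + d) := by
    simp only [pvSums]
    congr 1
    apply List.filter_congr
    intro d _
    simp only [decide_eq_decide]
    omega
  simp only [hbs]
  by_cases hc : 0 < c
  · simp only [hc, if_true]
    have hc1 : c - 1 < ds.length := by omega
    rw [PySem.List.pyGetD_natCast, List.getD_eq_getElem ds 0 hc1]
    have hmle : ds[c-1] ≤ b - k := (hiff _ hc1).mpr (by omega)
    have hmax : ∀ d ∈ ds, d ≤ b - k → d ≤ ds[c-1] := by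
      intro d hd hdle
      rcases List.mem_iff_getElem.mp hd with ⟨i, hi, rfl⟩
      have hic : i < c := by
        have h2 := (hiff i hi).mp hdle
        omega
      exact PySem.List.sorted_id_getElem_mono drives (by omega) hc1
    have hmem : (k + ds[c-1]) ∈ pvSums drives b k := by
      rw [hsums]
      refine List.mem_map.mpr ⟨ds[c-1], ?_, rfl⟩
      refine List.mem_filter.mpr ⟨(PySem.List.mem_sorted drives (fun x : Int => x) false _).mp ?_, by simp [hmle]⟩
      exact List.getElem_mem hc1
    have hbound : ∀ y ∈ pvSums drives b k, y ≤ k + ds[c-1] := by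
      rw [hsums]
      intro y hy
      rcases List.mem_map.mp hy with ⟨d, hd, rfl⟩
      rcases List.mem_filter.mp hd with ⟨hd1, hd2⟩
      have hd3 : d ≤ b - k := by simpa using hd2
      have hdds : d ∈ ds := (PySem.List.mem_sorted drives (fun x : Int => x) false d).mpr hd1
      exact Int.add_le_add_left (hmax d hdds hd3) k
    rw [pvOmax_foldl_eq _ acc (k + ds[c-1]) hmem hbound]
    cases acc with
    | none => rfl
    | some v =>
      simp only [pvOmax]
      split
      · next hsv => rw [max_eq_right hsv.le]
      · next hsv => rw [max_eq_left (not_lt.mp hsv)]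
  · simp only [hc, if_false]
    have hnil : pvSums drives b k = [] := by
      rw [hsums]
      have h0 : drives.countP (fun d => decide (d ≤ b - k)) = 0 := by
        rw [hperm.countP_eq] at hcdef; omega
      rw [List.countP_eq_zero] at h0
      rw [List.filter_eq_nil_iff.mpr h0]
      rfl
    rw [hnil]
    rfl

-- ---- gluing: B's fold over keyboards is the running max of all affordable sums ----

lemma pvBfold_eq (keyboards drives : List Int) (b : Int) (acc : Option Int) :
    keyboards.foldl (fun (best : Option Int) k =>
      let ds := PySem.List.sorted drives (fun x => x) false
      let lo := pvBSearch ds (b - k) 0 ds.length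
      if 0 < lo then
        let s := k + PySem.List.pyGetD ds ((lo - 1 : Nat) : Int) 0
        match best with
        | none => some s
        | some v => if s > v then some s else some v
      else best) acc
    = (keyboards.flatMap (fun k => pvSums drives b k)).foldl pvOmax acc := by
  induction keyboards generalizing acc with
  | nil => rfl
  | cons k t ih =>
    simp only [List.foldl_cons, List.flatMap_cons, List.foldl_append]
    rw [show (let ds := PySem.List.sorted drives (fun x => x) false
      let lo := pvBSearch ds (b - k) 0 ds.length
      if 0 < lo then
        let s := k + PySem.List.pyGetD ds ((lo - 1 : Nat) : Int) 0
        match acc with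
        | none => some s
        | some v => if s > v then some s else some v
      else acc) = (pvSums drives b k).foldl pvOmax acc from pvStep_eq drives b k acc]
    exact ih _

-- ===== VERDICT (by name: the statement is the Claim_ definition above) =====
theorem getMoneySpent_spec : Claim_equal_getMoneySpent := by
  intro keyboards drives b _
  unfold Spec_getMoneySpent getMoneySpent getMoneySpent_alt
  simp only [pvBfold_eq, pvA_ls]
  cases h : keyboards.flatMap (fun k => pvSums drives b k) with
  | nil => rfl
  | cons s t =>
    simp only [List.foldl_cons, pvOmax, pvOmax_some_foldl]
    rw [PySem.List.max?_id_cons]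
    simp
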